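-- pv_equiv track=rewrite | github.com/oemd001/imspeed | question_zero.py | find_clashes
-- ===== SOURCE A (Python) =====
-- def find_clashes(bond_payments):
--     bonds = sorted(bond_payments.keys())
--     clashes = set()
--     for i in range(len(bonds)):
--         for j in range(i + 1, len(bonds)):
--             bond1, bond2 = bonds[i], bonds[j]
--             if bond_payments[bond1] & bond_payments[bond2]:  # Check for intersection in payment dates
--                 clashes.add(f"{bond1}-{bond2}")
--     return clashes
-- ===== SOURCE B (Python) =====
-- def find_clashes(bond_payments):
--     # Inverted index: payment date -> bonds having a payment on that date;
--     # clashing pairs are then emitted per shared date instead of testing all bond pairs.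
--     by_date = {}
--     for bond, dates in bond_payments.items():
--         for d in dates:
--             by_date[d] = by_date.get(d, []) + [bond]
--     pairs = set()
--     for group in by_date.values():
--         for i, b1 in enumerate(group):
--             for b2 in group[i + 1:]:
--                 if b1 != b2:
--                     pairs.add((min(b1, b2), max(b1, b2)))
--     return {f"{a}-{b}" for a, b in sorted(pairs)}
-- ===== Notes on version B (the rewrite author's own statement) =====
-- stated objective: faster
-- what changed: Replaced the all-pairs scan with per-date set intersections by an inverted index date->bonds that emits clashing pairs only per shared date, then sorts the pair set once to format the results.
import Mathlib
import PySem

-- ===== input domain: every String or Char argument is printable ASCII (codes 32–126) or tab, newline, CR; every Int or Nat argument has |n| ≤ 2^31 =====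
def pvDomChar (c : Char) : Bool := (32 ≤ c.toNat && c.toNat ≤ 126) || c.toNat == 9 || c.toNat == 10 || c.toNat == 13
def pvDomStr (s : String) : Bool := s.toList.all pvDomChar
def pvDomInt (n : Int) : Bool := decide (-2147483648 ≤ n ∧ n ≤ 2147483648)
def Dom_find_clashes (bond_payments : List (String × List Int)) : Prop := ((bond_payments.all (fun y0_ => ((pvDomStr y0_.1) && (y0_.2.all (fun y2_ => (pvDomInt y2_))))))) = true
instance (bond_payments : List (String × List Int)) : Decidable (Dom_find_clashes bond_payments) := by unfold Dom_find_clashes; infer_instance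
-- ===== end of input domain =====

-- B replaces A's all-pairs intersection scan by an inverted index date -> bonds; both
-- return the set of clashing bond pairs and the ports return the identical list.

-- ===== PORT A =====
-- A: bonds = sorted(dict.keys()); nested index loops; clashes.add(f"{b1}-{b2}") when the
-- payment-date sets intersect; f"{b1}-{b2}" is ported exactly as "-".join([b1, b2]).
def find_clashes (bond_payments : List (String × List Int)) : List String :=
  let d := PySem.Dict.ofList bond_payments
  let bonds := PySem.List.sorted (PySem.Dict.keys d) (fun x => x) false
  (PySem.List.pyRange 0 (bonds.length : Int) 1).foldl (fun clashes i =>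
    (PySem.List.pyRange (i + 1) (bonds.length : Int) 1).foldl (fun clashes j =>
      let bond1 := PySem.List.pyGetD bonds i ""
      let bond2 := PySem.List.pyGetD bonds j ""
      if PySem.Set.inter (PySem.Dict.getD d bond1 []) (PySem.Dict.getD d bond2 []) ≠ [] then
        PySem.Set.add clashes (PySem.Str.join "-" [bond1, bond2])
      else clashes) clashes) PySem.Set.empty

-- ===== PORT B =====
def find_clashes_alt (bond_payments : List (String × List Int)) : List String :=
  let d := PySem.Dict.ofList bond_payments
  let by_date := (PySem.Dict.items d).foldl (fun idx kv =>
      kv.2.foldl (fun idx dt => PySem.Dict.modify idx dt [] (fun g => g ++ [kv.1])) idx)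
    PySem.Dict.empty
  let pairs := (PySem.Dict.values by_date).foldl (fun ps group =>
      (PySem.List.enumerate group 0).foldl (fun ps p =>
        (PySem.List.slice group (some (p.1 + 1)) none).foldl (fun ps b2 =>
          if p.2 ≠ b2 then PySem.Set.add ps (min p.2 b2, max p.2 b2) else ps) ps) ps)
    PySem.Set.empty
  (PySem.List.sorted2 pairs (fun q => q.1) (fun q => q.2) false).foldl
    (fun out q => PySem.Set.add out (PySem.Str.join "-" [q.1, q.2])) PySem.Set.empty

-- ===== PRECONDITION & SPEC =====
def Spec_find_clashes (bond_payments : List (String × List Int)) (out : List String) : Prop := out = find_clashes_alt bond_payments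
instance (bond_payments : List (String × List Int)) (out : List String) : Decidable (Spec_find_clashes bond_payments out) := by unfold Spec_find_clashes; infer_instance

-- ===== CLAIM (what is proved, stated in full; the proofs are below) =====
def Claim_equal_find_clashes : Prop := ∀ (bond_payments : List (String × List Int)), Dom_find_clashes bond_payments → Spec_find_clashes bond_payments (find_clashes bond_payments)

-- ===== LEMMAS AND PROOFS =====

-- all ordered pairs (earlier element, later element) of a list
def pvPairsOf : List String → List (String × String)
  | [] => []
  | b :: r => r.map (fun b2 => (b, b2)) ++ pvPairsOf r

-- shared dictionary view
def pvD (bp : List (String × List Int)) : PySem.Dict String (List Int) := PySem.Dict.ofList bp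
def pvVal (bp : List (String × List Int)) (k : String) : List Int := (pvD bp).getD k []
def pvBonds (bp : List (String × List Int)) : List String :=
  PySem.List.sorted (PySem.Dict.keys (pvD bp)) (fun x => x) false
def pvFmt (q : String × String) : String := PySem.Str.join "-" [q.1, q.2]
-- the list A's loop inserts (in order)
def pvT (bp : List (String × List Int)) : List (String × String) :=
  (pvPairsOf (pvBonds bp)).filter
    (fun q => decide (PySem.Set.inter (pvVal bp q.1) (pvVal bp q.2) ≠ []))
-- B's per-group emission list
def pvE (h : List String) : List (String × String) :=
  ((pvPairsOf h).filter (fun q => decide (q.1 ≠ q.2))).map (fun q => (min q.1 q.2, max q.1 q.2))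
-- B's flat (date, bond) list
def pvL (bp : List (String × List Int)) : List (Int × String) :=
  (PySem.Dict.items (pvD bp)).flatMap (fun kv => kv.2.map (fun dt => (dt, kv.1)))
-- B's inverted index and its groups
def pvIdx (bp : List (String × List Int)) : PySem.Dict Int (List String) :=
  (pvL bp).foldl (fun idx p => PySem.Dict.modify idx p.1 [] (fun g => g ++ [p.2])) PySem.Dict.empty
def pvGroup (bp : List (String × List Int)) (dt : Int) : List String :=
  (pvIdx bp).getD dt []

-- generic fold lemmas -------------------------------------------------------
theorem pv_foldl_ite_add {α β : Type} [BEq β] [LawfulBEq β] (l : List α) (p : α → Prop)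
    [DecidablePred p] (g : α → β) (s : PySem.Set β) :
    l.foldl (fun s x => if p x then PySem.Set.add s (g x) else s) s
      = PySem.Set.update s ((l.filter (fun x => decide (p x))).map g) := by
  induction l generalizing s with
  | nil => simp [PySem.Set.update_nil]
  | cons x r ih => by_cases hx : p x <;> simp [hx, ih, PySem.Set.update_cons]

theorem pv_foldl_update {β γ : Type} [BEq γ] [LawfulBEq γ] (l : List β) (F : β → List γ) :
    ∀ s : PySem.Set γ, l.foldl (fun s g => PySem.Set.update s (F g)) s
      = PySem.Set.update s (l.flatMap F) := by
  induction l with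
  | nil => intro s; simp [PySem.Set.update_nil]
  | cons x r ih => intro s; simp [ih, PySem.Set.update_append]

-- pvPairsOf facts -----------------------------------------------------------
theorem pv_mem_pairsOf (g : List String) (q : String × String) (h : q ∈ pvPairsOf g) :
    q.1 ∈ g ∧ q.2 ∈ g := by
  induction g with
  | nil => simp [pvPairsOf] at h
  | cons x r ih =>
      simp only [pvPairsOf, List.mem_append, List.mem_map] at h
      rcases h with ⟨b2, hb2, rfl⟩ | h
      · exact ⟨by simp, by simp [hb2]⟩
      · rcases ih h with ⟨h1, h2⟩; exact ⟨by simp [h1], by simp [h2]⟩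

theorem pv_pairsOf_intro (g : List String) (a b : String) (ha : a ∈ g) (hb : b ∈ g)
    (hne : a ≠ b) : (a, b) ∈ pvPairsOf g ∨ (b, a) ∈ pvPairsOf g := by
  induction g with
  | nil => simp at ha
  | cons x r ih =>
      simp only [List.mem_cons] at ha hb
      rcases ha with rfl | ha
      · rcases hb with rfl | hb
        · exact absurd rfl hne
        · exact Or.inl (by simp [pvPairsOf, hb])
      · rcases hb with rfl | hb
        · exact Or.inr (by simp [pvPairsOf, ha])
        · rcases ih ha hb with h | h
          · exact Or.inl (by simp [pvPairsOf, h])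
          · exact Or.inr (by simp [pvPairsOf, h])

theorem pv_pairsOf_lt (g : List String) (hg : g.Pairwise (· < ·)) (a b : String)
    (h : (a, b) ∈ pvPairsOf g) : a < b := by
  induction g with
  | nil => simp [pvPairsOf] at h
  | cons x r ih =>
      rcases List.pairwise_cons.mp hg with ⟨hx, hr⟩
      simp only [pvPairsOf, List.mem_append, List.mem_map] at h
      rcases h with ⟨b2, hb2, he⟩ | h
      · cases he; exact hx _ hb2
      · exact ih hr h

theorem pv_mem_pairsOf_sorted (g : List String) (hg : g.Pairwise (· < ·)) (a b : String) :
    (a, b) ∈ pvPairsOf g ↔ a ∈ g ∧ b ∈ g ∧ a < b := by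
  constructor
  · intro h
    exact ⟨(pv_mem_pairsOf g _ h).1, (pv_mem_pairsOf g _ h).2, pv_pairsOf_lt g hg a b h⟩
  · rintro ⟨ha, hb, hab⟩
    rcases pv_pairsOf_intro g a b ha hb (ne_of_lt hab) with h | h
    · exact h
    · exact absurd hab (asymm (pv_pairsOf_lt g hg b a h))

theorem pv_pairsOf_pairwise (g : List String) (hg : g.Pairwise (· < ·)) :
    (pvPairsOf g).Pairwise (fun p q => p.1 < q.1 ∨ (p.1 = q.1 ∧ p.2 < q.2)) := by
  induction g with
  | nil => exact List.Pairwise.nil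
  | cons x r ih =>
      rcases List.pairwise_cons.mp hg with ⟨hx, hr⟩
      refine List.pairwise_append.mpr ⟨?_, ih hr, ?_⟩
      · exact List.Pairwise.map _ (fun a b hab => Or.inr ⟨rfl, hab⟩) hr
      · intro p hp q hq
        rcases List.mem_map.mp hp with ⟨b2, _, rfl⟩
        exact Or.inl (hx _ (pv_mem_pairsOf r q hq).1)

-- bonds facts ---------------------------------------------------------------
theorem pv_bonds_pairwise (bp : List (String × List Int)) :
    (pvBonds bp).Pairwise (· < ·) := by
  have hnd : (pvBonds bp).Nodup :=
    (PySem.List.sorted_perm _ _ _).nodup_iff.mpr (PySem.Dict.nodup_keys_ofList bp)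
  have hle : (pvBonds bp).Pairwise (· ≤ ·) := by
    have := PySem.List.sorted_pairwise (PySem.Dict.keys (pvD bp)) (fun x => x)
    simpa [pvBonds] using this
  exact hle.imp₂ (fun a b h1 h2 => lt_of_le_of_ne h1 h2) hnd

theorem pv_mem_bonds (bp : List (String × List Int)) (k : String) :
    k ∈ pvBonds bp ↔ k ∈ PySem.Dict.keys (pvD bp) := by
  simp [pvBonds, PySem.List.mem_sorted]

-- A's loop ------------------------------------------------------------------
theorem pv_loopA (bp : List (String × List Int)) (g : List String) :
    ∀ (n a : Nat) (s : PySem.Set String), g.length - a = n →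
    (PySem.List.pyRange (a : Int) (g.length : Int) 1).foldl (fun clashes i =>
      (PySem.List.pyRange (i + 1) (g.length : Int) 1).foldl (fun clashes j =>
        if PySem.Set.inter ((pvD bp).getD (PySem.List.pyGetD g i "") [])
              ((pvD bp).getD (PySem.List.pyGetD g j "") []) ≠ [] then
          PySem.Set.add clashes
            (PySem.Str.join "-" [PySem.List.pyGetD g i "", PySem.List.pyGetD g j ""])
        else clashes) clashes) s
    = PySem.Set.update s
        ((((pvPairsOf (g.drop a)).filter
            (fun q => decide (PySem.Set.inter (pvVal bp q.1) (pvVal bp q.2) ≠ []))).map pvFmt)) := by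
  intro n
  induction n with
  | zero =>
      intro a s ha
      have h1 : g.drop a = [] := List.drop_eq_nil_of_le (by omega)
      have h2 : PySem.List.pyRange (a : Int) (g.length : Int) 1 = [] :=
        PySem.List.pyRange_one_eq_nil (by omega)
      simp [h1, h2, pvPairsOf, PySem.Set.update_nil]
  | succ n ih =>
      intro a s ha
      have halt : a < g.length := by omega
      rw [PySem.List.pyRange_one_cons (by omega : (a : Int) < (g.length : Int)),
          List.foldl_cons]
      have hga : PySem.List.pyGetD g (a : Int) "" = g[a] :=
        PySem.List.pyGetD_eq_getElem g "" (by omega) (by omega)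
      have hcast : (a : Int) + 1 = ((a + 1 : Nat) : Int) := by push_cast; ring
      rw [hcast,
          PySem.List.foldl_pyRange_pyGetD' g ""
            (fun clashes b2 =>
              if PySem.Set.inter ((pvD bp).getD (PySem.List.pyGetD g (a : Int) "") [])
                    ((pvD bp).getD b2 []) ≠ [] then
                PySem.Set.add clashes
                  (PySem.Str.join "-" [PySem.List.pyGetD g (a : Int) "", b2])
              else clashes) s (by omega : (0:Int) ≤ ((a + 1 : Nat) : Int)),
          Int.toNat_natCast, hga,
          pv_foldl_ite_add (g.drop (a + 1))
            (fun b2 => PySem.Set.inter ((pvD bp).getD g[a] []) ((pvD bp).getD b2 []) ≠ [])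
            (fun b2 => PySem.Str.join "-" [g[a], b2]) s,
          ih (a + 1) _ (by omega), ← PySem.Set.update_append]
      congr 1
      rw [List.drop_eq_getElem_cons halt]
      simp only [pvPairsOf, List.filter_append, List.map_append]
      congr 1
      simp only [List.filter_map, List.map_map]
      rfl

theorem pv_A_eq (bp : List (String × List Int)) :
    find_clashes bp = PySem.Set.update PySem.Set.empty ((pvT bp).map pvFmt) := by
  have h := pv_loopA bp (pvBonds bp) (pvBonds bp).length 0 PySem.Set.empty (by omega)
  simp only [Nat.cast_zero, List.drop_zero] at h
  rw [pvT]
  exact h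

-- B's index -----------------------------------------------------------------
theorem pv_idx_eq (bp : List (String × List Int)) :
    (PySem.Dict.items (PySem.Dict.ofList bp)).foldl (fun idx kv =>
        kv.2.foldl (fun idx dt => PySem.Dict.modify idx dt [] (fun g => g ++ [kv.1])) idx)
      PySem.Dict.empty = pvIdx bp := by
  rw [pvIdx, pvL, List.foldl_flatMap]
  simp [List.foldl_map, pvD]

theorem pv_group_eq (bp : List (String × List Int)) (dt : Int) :
    pvGroup bp dt = ((pvL bp).filter (fun p => p.1 == dt)).map (·.2) := by
  simp [pvGroup, pvIdx, PySem.Dict.getD_foldl_modify_append, PySem.Dict.getD_empty]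

theorem pv_mem_L (bp : List (String × List Int)) (dt : Int) (k : String) :
    (dt, k) ∈ pvL bp ↔ k ∈ PySem.Dict.keys (pvD bp) ∧ dt ∈ pvVal bp k := by
  have hnd : (pvD bp).keys.Nodup := PySem.Dict.nodup_keys_ofList bp
  simp only [pvL, List.mem_flatMap, List.mem_map, Prod.mk.injEq]
  constructor
  · rintro ⟨⟨k1, v1⟩, hkv, dt', hdt', rfl, rfl⟩
    have hg : (pvD bp).get? k1 = some v1 :=
      PySem.Dict.get?_of_mem_items _ hkv hnd
    refine ⟨PySem.Dict.mem_keys_of_mem_items _ hkv, ?_⟩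
    rw [pvVal, PySem.Dict.getD_of_get?_eq_some _ _ hg]; exact hdt'
  · rintro ⟨hk, hdt⟩
    rcases ho : (pvD bp).get? k with _ | v
    · exact absurd ho (by simp [PySem.Dict.get?_eq_none_iff_not_mem_keys, hk])
    · refine ⟨(k, v), PySem.Dict.mem_items_of_get?_eq_some _ ho, dt, ?_, rfl, rfl⟩
      rw [pvVal, PySem.Dict.getD_of_get?_eq_some _ _ ho] at hdt; exact hdt

theorem pv_mem_group (bp : List (String × List Int)) (dt : Int) (k : String) :
    k ∈ pvGroup bp dt ↔ k ∈ PySem.Dict.keys (pvD bp) ∧ dt ∈ pvVal bp k := by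
  rw [pv_group_eq, ← pv_mem_L]
  simp only [List.mem_map, List.mem_filter, beq_iff_eq]
  constructor
  · rintro ⟨p, ⟨hp, rfl⟩, rfl⟩; exact hp
  · intro h; exact ⟨(dt, k), ⟨h, rfl⟩, rfl⟩

theorem pv_idx_keys_nodup (bp : List (String × List Int)) : (pvIdx bp).keys.Nodup := by
  exact PySem.Dict.nodup_keys_foldl_modify_key _ _ _ _ _ (by simp [PySem.Dict.keys_empty])

theorem pv_idx_values (bp : List (String × List Int)) :
    (pvIdx bp).values = (pvIdx bp).keys.map (fun dt => pvGroup bp dt) := by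
  exact PySem.Dict.values_eq_map_keys _ (pv_idx_keys_nodup bp) []

theorem pv_mem_idx_keys (bp : List (String × List Int)) (dt : Int) :
    dt ∈ (pvIdx bp).keys ↔ ∃ k, k ∈ PySem.Dict.keys (pvD bp) ∧ dt ∈ pvVal bp k := by
  have hk : (pvIdx bp).keys = PySem.Set.ofList ((pvL bp).map (·.1)) := by
    rw [pvIdx, PySem.Dict.keys_foldl_modify_key]
    simp [PySem.Dict.keys_empty, PySem.Set.update_nil_left]
  rw [hk]
  simp only [PySem.Set.mem_ofList, List.mem_map]
  constructor
  · rintro ⟨p, hp, rfl⟩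
    exact ⟨p.2, (pv_mem_L bp p.1 p.2).mp hp⟩
  · rintro ⟨k, hk1, hk2⟩
    exact ⟨(dt, k), (pv_mem_L bp dt k).mpr ⟨hk1, hk2⟩, rfl⟩

-- B's pair loop over one group ---------------------------------------------
theorem pv_loopB (g : List String) :
    ∀ (n k : Nat) (s : PySem.Set (String × String)), g.length - k = n →
    (PySem.List.enumerate (g.drop k) (k : Int)).foldl (fun ps p =>
      (PySem.List.slice g (some (p.1 + 1)) none).foldl (fun ps b2 =>
        if p.2 ≠ b2 then PySem.Set.add ps (min p.2 b2, max p.2 b2) else ps) ps) s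
    = PySem.Set.update s (pvE (g.drop k)) := by
  intro n
  induction n with
  | zero =>
      intro k s hk
      have : g.drop k = [] := List.drop_eq_nil_of_le (by omega)
      simp [this, PySem.List.enumerate_nil, pvE, pvPairsOf, PySem.Set.update_nil]
  | succ n ih =>
      intro k s hk
      have hklt : k < g.length := by omega
      have hd : g.drop k = g[k] :: g.drop (k + 1) := List.drop_eq_getElem_cons hklt
      rw [hd, PySem.List.enumerate_cons, List.foldl_cons]
      have hcast : (k : Int) + 1 = ((k + 1 : Nat) : Int) := by push_cast; ring
      have hslice : PySem.List.slice g (some ((k : Int) + 1)) none = g.drop (k + 1) := by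
        rw [hcast, PySem.List.slice_from g (by omega : (0:Int) ≤ ((k + 1 : Nat) : Int)),
            Int.toNat_natCast]
      rw [hslice, pv_foldl_ite_add (g.drop (k + 1)) (fun b2 => g[k] ≠ b2)
            (fun b2 => (min g[k] b2, max g[k] b2)) s, hcast,
          ih (k + 1) _ (by omega), ← PySem.Set.update_append]
      congr 1
      simp only [pvE, pvPairsOf, List.filter_append, List.map_append]
      congr 1
      simp only [List.filter_map, List.map_map]
      rfl

-- B's pair set --------------------------------------------------------------
theorem pv_pairs_eq (bp : List (String × List Int)) :
    ((pvIdx bp).values).foldl (fun ps group =>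
      (PySem.List.enumerate group 0).foldl (fun ps p =>
        (PySem.List.slice group (some (p.1 + 1)) none).foldl (fun ps b2 =>
          if p.2 ≠ b2 then PySem.Set.add ps (min p.2 b2, max p.2 b2) else ps) ps) ps)
      PySem.Set.empty
    = PySem.Set.ofList (((pvIdx bp).values).flatMap pvE) := by
  have hgrp : ∀ (group : List String) (s : PySem.Set (String × String)),
      (PySem.List.enumerate group 0).foldl (fun ps p =>
        (PySem.List.slice group (some (p.1 + 1)) none).foldl (fun ps b2 =>
          if p.2 ≠ b2 then PySem.Set.add ps (min p.2 b2, max p.2 b2) else ps) ps) s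
      = PySem.Set.update s (pvE group) := by
    intro group s
    have := pv_loopB group group.length 0 s (by omega)
    simpa using this
  have hfun : (fun (ps : PySem.Set (String × String)) (group : List String) =>
      (PySem.List.enumerate group 0).foldl (fun ps p =>
        (PySem.List.slice group (some (p.1 + 1)) none).foldl (fun ps b2 =>
          if p.2 ≠ b2 then PySem.Set.add ps (min p.2 b2, max p.2 b2) else ps) ps) ps)
      = (fun s g => PySem.Set.update s (pvE g)) :=
    funext fun s => funext fun g => hgrp g s
  rw [hfun, pv_foldl_update]
  exact PySem.Set.update_nil_left _

theorem pv_mem_E (h : List String) (q : String × String) :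
    q ∈ pvE h ↔ ∃ p ∈ pvPairsOf h, p.1 ≠ p.2 ∧ q = (min p.1 p.2, max p.1 p.2) := by
  simp [pvE]
  constructor
  · rintro ⟨a, b, ⟨hm, hne⟩, rfl⟩; exact ⟨a, b, hm, hne, rfl⟩
  · rintro ⟨a, b, hm, hne, rfl⟩; exact ⟨a, b, ⟨hm, hne⟩, rfl⟩

-- characterization of membership in B's pair set and in A's pvT -------------
def pvClash (bp : List (String × List Int)) (a b : String) : Prop :=
  ∃ dt, dt ∈ pvVal bp a ∧ dt ∈ pvVal bp b

theorem pv_mem_flat (bp : List (String × List Int)) (q : String × String) :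
    q ∈ ((pvIdx bp).values).flatMap pvE ↔
      q.1 < q.2 ∧ q.1 ∈ PySem.Dict.keys (pvD bp) ∧ q.2 ∈ PySem.Dict.keys (pvD bp) ∧
        pvClash bp q.1 q.2 := by
  rw [pv_idx_values]
  simp only [List.mem_flatMap, List.mem_map]
  constructor
  · rintro ⟨g, ⟨dt, hdt, rfl⟩, hq⟩
    rcases (pv_mem_E _ q).mp hq with ⟨p, hp, hne, rfl⟩
    have h1 := (pv_mem_group bp dt p.1).mp (pv_mem_pairsOf _ _ hp).1
    have h2 := (pv_mem_group bp dt p.2).mp (pv_mem_pairsOf _ _ hp).2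
    have hmin : min p.1 p.2 ∈ PySem.Dict.keys (pvD bp) ∧ dt ∈ pvVal bp (min p.1 p.2) := by
      rcases min_choice p.1 p.2 with hm | hm <;> rw [hm] <;> [exact h1; exact h2]
    have hmax : max p.1 p.2 ∈ PySem.Dict.keys (pvD bp) ∧ dt ∈ pvVal bp (max p.1 p.2) := by
      rcases max_choice p.1 p.2 with hm | hm <;> rw [hm] <;> [exact h1; exact h2]
    exact ⟨min_lt_max.mpr hne, hmin.1, hmax.1, dt, hmin.2, hmax.2⟩
  · rintro ⟨hlt, hk1, hk2, dt, hd1, hd2⟩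
    refine ⟨pvGroup bp dt, ⟨dt, (pv_mem_idx_keys bp dt).mpr ⟨q.1, hk1, hd1⟩, rfl⟩, ?_⟩
    have hg1 : q.1 ∈ pvGroup bp dt := (pv_mem_group bp dt q.1).mpr ⟨hk1, hd1⟩
    have hg2 : q.2 ∈ pvGroup bp dt := (pv_mem_group bp dt q.2).mpr ⟨hk2, hd2⟩
    refine (pv_mem_E _ q).mpr ?_
    rcases pv_pairsOf_intro _ _ _ hg1 hg2 (ne_of_lt hlt) with h | h
    · exact ⟨(q.1, q.2), h, ne_of_lt hlt, by
        simp [min_eq_left (le_of_lt hlt), max_eq_right (le_of_lt hlt)]⟩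
    · exact ⟨(q.2, q.1), h, (ne_of_lt hlt).symm, by
        simp [min_eq_right (le_of_lt hlt), max_eq_left (le_of_lt hlt)]⟩

theorem pv_mem_T (bp : List (String × List Int)) (q : String × String) :
    q ∈ pvT bp ↔
      q.1 < q.2 ∧ q.1 ∈ PySem.Dict.keys (pvD bp) ∧ q.2 ∈ PySem.Dict.keys (pvD bp) ∧
        pvClash bp q.1 q.2 := by
  have hint : ∀ a b : String,
      PySem.Set.inter (pvVal bp a) (pvVal bp b) ≠ [] ↔ pvClash bp a b := by
    intro a b
    rw [ne_eq, ← List.isEmpty_iff, Bool.not_eq_true, List.isEmpty_eq_false_iff_exists_mem]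
    unfold pvClash
    constructor
    · rintro ⟨dt, hdt⟩; exact ⟨dt, (PySem.Set.mem_inter _ _ _).mp hdt⟩
    · rintro ⟨dt, hdt⟩; exact ⟨dt, (PySem.Set.mem_inter _ _ _).mpr hdt⟩
  rw [pvT, List.mem_filter]
  rcases q with ⟨a, b⟩
  rw [pv_mem_pairsOf_sorted _ (pv_bonds_pairwise bp)]
  simp only [pv_mem_bonds, decide_eq_true_eq, hint]
  tauto

theorem pv_T_pairwise (bp : List (String × List Int)) :
    (pvT bp).Pairwise (fun p q => p.1 < q.1 ∨ (p.1 = q.1 ∧ p.2 < q.2)) :=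
  (pv_pairsOf_pairwise _ (pv_bonds_pairwise bp)).filter _

theorem pv_T_nodup (bp : List (String × List Int)) : (pvT bp).Nodup := by
  refine (pv_T_pairwise bp).imp ?_
  rintro ⟨a1, a2⟩ ⟨b1, b2⟩ h
  rcases h with h | ⟨h1, h2⟩
  · simp only [ne_eq, Prod.mk.injEq, not_and]; intro he; exact absurd (he ▸ h) (lt_irrefl _)
  · simp only [ne_eq, Prod.mk.injEq, not_and]; intro _; exact ne_of_lt h2

-- sorted2 with two keys is sorted with the lexicographic key ----------------
theorem pv_sorted2_eq_sorted {α κ₁ κ₂ : Type} [LinearOrder κ₁] [LinearOrder κ₂]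
    (xs : List α) (k1 : α → κ₁) (k2 : α → κ₂) :
    PySem.List.sorted2 xs k1 k2 false
      = PySem.List.sorted xs (fun a => toLex (k1 a, k2 a)) false := by
  have hbe : (fun a b => decide (k1 a < k1 b) || (!decide (k1 b < k1 a) && decide (k2 a < k2 b)))
      = (fun a b : α => decide ((toLex (k1 a, k2 a)) < toLex (k1 b, k2 b))) := by
    funext a b
    by_cases h1 : k1 a < k1 b
    · simp [h1, Prod.Lex.lt_iff]
    · by_cases h2 : k1 b < k1 a
      · simp [h1, h2, Prod.Lex.lt_iff, ne_of_gt h2]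

      · have heq : k1 a = k1 b := le_antisymm (not_lt.mp h2) (not_lt.mp h1)
        by_cases h3 : k2 a < k2 b <;> simp [h3, Prod.Lex.lt_iff, heq]
  simp only [PySem.List.sorted2, PySem.List.sorted, if_neg (by simp : ¬ (false = true)), hbe]

-- the sorted pair list is exactly pvT ---------------------------------------
theorem pv_sorted2_eq (bp : List (String × List Int)) :
    PySem.List.sorted2 (PySem.Set.ofList (((pvIdx bp).values).flatMap pvE))
      (fun q => q.1) (fun q => q.2) false = pvT bp := by
  rw [pv_sorted2_eq_sorted]
  apply PySem.List.sorted_eq_of_perm_of_pairwise_lt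
  · refine (List.perm_ext_iff_of_nodup (pv_T_nodup bp) (PySem.Set.nodup_ofList _)).mpr ?_
    intro q
    rw [pv_mem_T, PySem.Set.mem_ofList, pv_mem_flat]
  · refine (pv_T_pairwise bp).imp ?_
    rintro ⟨a1, a2⟩ ⟨b1, b2⟩ h
    simpa [Prod.Lex.lt_iff] using h

-- ===== VERDICT (by name: the statement is the Claim_ definition above) =====
theorem find_clashes_spec : Claim_equal_find_clashes := by
  intro bp _
  unfold Spec_find_clashes
  rw [pv_A_eq]
  have halt : find_clashes_alt bp
      = (pvT bp).foldl (fun out q => PySem.Set.add out (PySem.Str.join "-" [q.1, q.2]))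
          PySem.Set.empty := by
    simp only [find_clashes_alt]
    rw [pv_idx_eq, pv_pairs_eq, pv_sorted2_eq]
  rw [halt, ← PySem.Set.update_map_eq_foldl_add]
  rfl
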